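-- pv_equiv track=rewrite | github.com/anc2001/threedftoolbox | parse_3df.py | get_poly_outline
-- ===== SOURCE A (Python) =====
-- def get_poly_outline(vertices, faces):
--     edge_dict = {}
--     for a, b, c in faces:
--         edges = [(a, b), (a, c), (b, c)]
--         for u, v in edges:
--             if u > v:
--                 u, v = v, u
--
--             if (u, v) not in edge_dict:
--                 edge_dict[(u, v)] = 1
--             else:
--                 edge_dict[(u, v)] = edge_dict[(u, v)] + 1
--
--     edge_candidates = [e for e in edge_dict.keys() if edge_dict[e] == 1]
--
--     loop = [edge_candidates[0]]
--     del edge_candidates[0]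
--
--     while len(edge_candidates) > 0:
--         prev_end = loop[-1][1]
--         removed = False
--         for i, (u, v) in enumerate(edge_candidates):
--             if u == prev_end:
--                 loop.append((u, v))
--                 del edge_candidates[i]
--                 removed = True
--                 break
--             if v == prev_end:
--                 loop.append((v, u))
--                 del edge_candidates[i]
--                 removed = True
--                 break
--         if not removed:
--             return None
--
--     return loop
-- ===== SOURCE B (Python) =====
-- def get_poly_outline(vertices, faces):
--     # Count each undirected edge once per face it appears in.
--     counts = {}
--     for a, b, c in faces:
--         for u, v in ((a, b), (a, c), (b, c)):
--             key = (min(u, v), max(u, v))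
--             counts[key] = counts.get(key, 0) + 1
--
--     cands = [e for e, n in counts.items() if n == 1]
--
--     # Vertex -> incident boundary edges (index, other endpoint), in index order.
--     adj = {}
--     for i, (u, v) in enumerate(cands):
--         adj.setdefault(u, []).append((i, v))
--         adj.setdefault(v, []).append((i, u))
--
--     loop = [cands[0]]
--     used = {0}
--     prev = cands[0][1]
--     for _ in range(len(cands) - 1):
--         step = next(((i, w) for i, w in adj.get(prev, []) if i not in used), None)
--         if step is None:
--             return None
--         i, w = step
--         used.add(i)
--         loop.append((prev, w))
--         prev = w
--     return loop
-- ===== Notes on version B (the rewrite author's own statement) =====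
-- stated objective: alternative
-- what changed: B builds a vertex->incident-boundary-edge adjacency map once and walks the loop marking edges used by index, instead of A's repeated linear rescans (with deletion) of the remaining candidate list; the index-ordered adjacency lists preserve A's first-match tie-breaking exactly. (Intended to avoid A's worst-case quadratic rescans; a timing run measured only 1.31x at its largest size, so no speed is claimed.)
-- outside the precondition, e.g. on get_poly_outline([], [(0, 1, 2), (0, 1, 2)]): A raises IndexError, B raises IndexError
import Mathlib
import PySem

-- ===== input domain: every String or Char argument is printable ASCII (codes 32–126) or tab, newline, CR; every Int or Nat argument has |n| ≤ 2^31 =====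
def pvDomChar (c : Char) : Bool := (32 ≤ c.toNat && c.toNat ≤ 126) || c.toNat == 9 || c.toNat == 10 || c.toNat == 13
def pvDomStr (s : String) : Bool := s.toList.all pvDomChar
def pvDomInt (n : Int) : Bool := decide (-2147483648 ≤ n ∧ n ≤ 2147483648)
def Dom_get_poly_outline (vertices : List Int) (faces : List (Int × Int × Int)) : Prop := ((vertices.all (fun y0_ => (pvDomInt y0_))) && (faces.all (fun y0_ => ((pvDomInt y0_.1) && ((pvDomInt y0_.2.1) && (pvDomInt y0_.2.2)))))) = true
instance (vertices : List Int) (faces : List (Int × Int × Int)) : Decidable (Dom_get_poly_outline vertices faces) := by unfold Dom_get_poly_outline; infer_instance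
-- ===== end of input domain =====

-- B replaces A's repeated linear rescans of the remaining boundary-edge list by a vertex→incident-edge
-- adjacency map built once plus an index-based used set, preserving A's first-match tie-breaking.

-- ===== PORT A =====

-- edge_dict: count each normalized edge of each face
def pvEdgeDictA (faces : List (Int × Int × Int)) : PySem.Dict (Int × Int) Int :=
  faces.foldl (fun d f =>
    [(f.1, f.2.1), (f.1, f.2.2), (f.2.1, f.2.2)].foldl (fun d e =>
      let uv := if e.1 > e.2 then (e.2, e.1) else (e.1, e.2)
      if d.contains uv then d.insert uv (d.getD uv 0 + 1) else d.insert uv 1) d)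
    PySem.Dict.empty

-- the inner `for i, (u, v) in enumerate(edge_candidates): … del edge_candidates[i]; break` scan:
-- first edge containing p, oriented to start at p, together with the list after the deletion
def pvFindA (p : Int) : List (Int × Int) → Option ((Int × Int) × List (Int × Int))
  | [] => none
  | e :: rest =>
    if e.1 = p then some ((e.1, e.2), rest)
    else if e.2 = p then some ((e.2, e.1), rest)
    else
      match pvFindA p rest with
      | none => none
      | some (ed, rem) => some (ed, e :: rem)

-- each removal shortens the candidate list by one (cited by pvWhileA's termination proof)
theorem pvFindA_length (p : Int) : ∀ (xs : List (Int × Int)) (ed : Int × Int)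
    (rem : List (Int × Int)), pvFindA p xs = some (ed, rem) → rem.length + 1 = xs.length := by
  intro xs
  induction xs with
  | nil => intro ed rem h; simp [pvFindA] at h
  | cons e rest ih =>
    intro ed rem h
    simp only [pvFindA] at h
    split_ifs at h
    · cases h; rfl
    · cases h; rfl
    · cases hrec : pvFindA p rest with
      | none => rw [hrec] at h; cases h
      | some pr =>
        rw [hrec] at h
        cases h
        have := ih pr.1 pr.2 (by rw [hrec])
        simp [← this]

-- the `while len(edge_candidates) > 0:` loop
def pvWhileA (loop : List (Int × Int)) (cands : List (Int × Int)) : Option (List (Int × Int)) :=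
  match cands with
  | [] => some loop
  | e :: rest =>
    match PySem.List.pyGet? loop (-1) with
    | none => none    -- unreachable: loop is never empty
    | some pe =>
      match h : pvFindA pe.2 (e :: rest) with
      | none => none
      | some (ed, rem) => pvWhileA (loop ++ [ed]) rem
termination_by cands.length
decreasing_by
  have := pvFindA_length pe.2 (e :: rest) ed rem h
  simp at this ⊢
  omega

def get_poly_outline (vertices : List Int) (faces : List (Int × Int × Int)) : Option (List (Int × Int)) :=
  let d := pvEdgeDictA faces
  let cands := d.keys.filter (fun e => d.getD e 0 == 1)
  match cands with
  | [] => none     -- Python: `edge_candidates[0]` raises IndexError here (excluded by Pre_)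
  | c0 :: rest => pvWhileA [c0] rest

-- ===== PORT B =====

-- counts[key] = counts.get(key, 0) + 1  over the normalized edges of every face
def pvEdgeDictB (faces : List (Int × Int × Int)) : PySem.Dict (Int × Int) Int :=
  faces.foldl (fun d f =>
    [(f.1, f.2.1), (f.1, f.2.2), (f.2.1, f.2.2)].foldl (fun d e =>
      let key := (min e.1 e.2, max e.1 e.2)
      d.insert key (d.getD key 0 + 1)) d)
    PySem.Dict.empty

-- adj.setdefault(u, []).append((i, v)); adj.setdefault(v, []).append((i, u))
def pvAdjB (cs : List (Int × Int)) : PySem.Dict Int (List (Int × Int)) :=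
  (PySem.List.enumerate cs).foldl (fun d q =>
    (d.modify q.2.1 [] (· ++ [(q.1, q.2.2)])).modify q.2.2 [] (· ++ [(q.1, q.2.1)]))
    PySem.Dict.empty

-- next(((i, w) for i, w in adj.get(prev, []) if i not in used), None)
def pvFindB (used : List Int) : List (Int × Int) → Option (Int × Int)
  | [] => none
  | iw :: rest => if iw.1 ∈ used then pvFindB used rest else some iw

-- the `for _ in range(len(cands) - 1):` loop
def pvLoopB (adj : PySem.Dict Int (List (Int × Int))) :
    Nat → Int → List Int → List (Int × Int) → Option (List (Int × Int))
  | 0, _, _, loop => some loop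
  | k + 1, prev, used, loop =>
    match pvFindB used (adj.getD prev []) with
    | none => none
    | some iw => pvLoopB adj k iw.2 (PySem.Set.add used iw.1) (loop ++ [(prev, iw.2)])

def get_poly_outline_alt (vertices : List Int) (faces : List (Int × Int × Int)) : Option (List (Int × Int)) :=
  let cands := ((pvEdgeDictB faces).items.filter (fun p => p.2 == 1)).map Prod.fst
  match cands with
  | [] => none     -- Python: `cands[0]` raises IndexError here (excluded by Pre_)
  | c0 :: rest =>
    pvLoopB (pvAdjB (c0 :: rest)) rest.length c0.2 (PySem.Set.ofList [0]) [c0]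

-- ===== PRECONDITION & SPEC =====

-- Pre_ excludes exactly the inputs whose faces yield no edge used exactly once: there A's
-- `edge_candidates[0]` raises IndexError (B's `cands[0]` raises the same way).
def Pre_get_poly_outline (vertices : List Int) (faces : List (Int × Int × Int)) : Prop :=
  let es := faces.flatMap (fun f =>
    [(min f.1 f.2.1, max f.1 f.2.1), (min f.1 f.2.2, max f.1 f.2.2),
     (min f.2.1 f.2.2, max f.2.1 f.2.2)])
  ∃ e ∈ es, es.count e = 1

instance (vertices : List Int) (faces : List (Int × Int × Int)) : Decidable (Pre_get_poly_outline vertices faces) := by unfold Pre_get_poly_outline; infer_instance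

def pvWitness_get_poly_outline : List Int × (List (Int × Int × Int)) := ([], [(0, 1, 2)])

def Spec_get_poly_outline (vertices : List Int) (faces : List (Int × Int × Int)) (out : Option (List (Int × Int))) : Prop := out = get_poly_outline_alt vertices faces
instance (vertices : List Int) (faces : List (Int × Int × Int)) (out : Option (List (Int × Int))) : Decidable (Spec_get_poly_outline vertices faces out) := by unfold Spec_get_poly_outline; infer_instance

-- ===== CLAIM (what is proved, stated in full; the proofs are below) =====
def Claim_equal_get_poly_outline : Prop := ∀ (vertices : List Int) (faces : List (Int × Int × Int)), Dom_get_poly_outline vertices faces → Pre_get_poly_outline vertices faces → Spec_get_poly_outline vertices faces (get_poly_outline vertices faces)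

-- ===== LEMMAS AND PROOFS =====

theorem pv_inner_step (d : PySem.Dict (Int × Int) Int) (e : Int × Int) :
    (let uv := if e.1 > e.2 then (e.2, e.1) else (e.1, e.2)
     if d.contains uv then d.insert uv (d.getD uv 0 + 1) else d.insert uv 1)
    = (let key := (min e.1 e.2, max e.1 e.2)
       d.insert key (d.getD key 0 + 1)) := by
  have huv : (if e.1 > e.2 then (e.2, e.1) else (e.1, e.2)) = (min e.1 e.2, max e.1 e.2) := by
    split_ifs with h <;> simp [Prod.ext_iff, Int.min_def, Int.max_def] <;> omega
  simp only [huv]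
  by_cases hc : d.contains (min e.1 e.2, max e.1 e.2)
  · simp [hc]
  · simp only [Bool.not_eq_true] at hc
    simp [hc, PySem.Dict.getD_of_not_contains d _ hc]

theorem pv_dicts_eq (faces : List (Int × Int × Int)) : pvEdgeDictA faces = pvEdgeDictB faces := by
  unfold pvEdgeDictA pvEdgeDictB
  congr 1
  funext d f
  congr 1
  funext d e
  exact pv_inner_step d e

theorem pv_keys_nodup (faces : List (Int × Int × Int)) : (pvEdgeDictB faces).keys.Nodup := by
  unfold pvEdgeDictB
  generalize hd : PySem.Dict.empty = d0
  have h0 : d0.keys.Nodup := by rw [← hd]; exact PySem.Dict.nodup_keys_empty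
  clear hd
  induction faces generalizing d0 with
  | nil => simpa using h0
  | cons f t ih =>
    simp only [List.foldl_cons]
    exact ih _ (PySem.Dict.nodup_keys_foldl_insert_key [(f.1, f.2.1), (f.1, f.2.2), (f.2.1, f.2.2)]
      (fun e => (min e.1 e.2, max e.1 e.2)) (fun d e => d.getD (min e.1 e.2, max e.1 e.2) 0 + 1) d0 h0)

theorem pv_cands_eq (faces : List (Int × Int × Int)) :
    (pvEdgeDictA faces).keys.filter (fun e => (pvEdgeDictA faces).getD e 0 == 1)
      = ((pvEdgeDictB faces).items.filter (fun p => p.2 == 1)).map Prod.fst := by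
  rw [pv_dicts_eq]
  rw [PySem.Dict.items_eq_map_keys _ (pv_keys_nodup faces) 0]
  rw [List.filter_map, List.map_map]
  simp [Function.comp_def]

def pvEntries (p : Int) (q : Int × (Int × Int)) : List (Int × Int) :=
  (if q.2.1 = p then [(q.1, q.2.2)] else []) ++ (if q.2.2 = p then [(q.1, q.2.1)] else [])

theorem pv_step_getD (d : PySem.Dict Int (List (Int × Int))) (a b p : Int) (x y : Int × Int) :
    ((d.modify a [] (· ++ [x])).modify b [] (· ++ [y])).getD p []
      = d.getD p [] ++ ((if a = p then [x] else []) ++ (if b = p then [y] else [])) := by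
  by_cases ha : p = a <;> by_cases hb : p = b
  · subst ha; subst hb; simp [PySem.Dict.getD_modify_self]
  · subst ha
    have hb' : ¬ b = p := fun h => hb h.symm
    simp [PySem.Dict.getD_modify, hb, hb']
  · subst hb
    have ha' : ¬ a = p := fun h => ha h.symm
    simp [PySem.Dict.getD_modify, ha, ha']
  · have ha' : ¬ a = p := fun h => ha h.symm
    have hb' : ¬ b = p := fun h => hb h.symm
    simp [PySem.Dict.getD_modify, ha, hb, ha', hb']

theorem pv_adj_fold (p : Int) (L : List (Int × (Int × Int))) :
    ∀ (d : PySem.Dict Int (List (Int × Int))),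
    (L.foldl (fun d q =>
      (d.modify q.2.1 [] (· ++ [(q.1, q.2.2)])).modify q.2.2 [] (· ++ [(q.1, q.2.1)])) d).getD p []
      = d.getD p [] ++ L.flatMap (pvEntries p) := by
  induction L with
  | nil => intro d; simp
  | cons q t ih =>
    intro d
    simp only [List.foldl_cons, List.flatMap_cons]
    rw [ih]
    rw [pv_step_getD]
    unfold pvEntries
    simp

theorem pv_adj_getD (cs : List (Int × Int)) (p : Int) :
    (pvAdjB cs).getD p [] = (PySem.List.enumerate cs).flatMap (pvEntries p) := by
  unfold pvAdjB
  rw [pv_adj_fold]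
  simp

theorem pv_step_corr (p : Int) (L : List (Int × (Int × Int))) (used : List Int)
    (hnd : (L.map Prod.fst).Nodup) :
    (pvFindB used (L.flatMap (pvEntries p)) = none ∧
      pvFindA p ((L.filter (fun q => decide (q.1 ∉ used))).map Prod.snd) = none) ∨
    (∃ iw, pvFindB used (L.flatMap (pvEntries p)) = some iw ∧ iw.1 ∉ used ∧
      iw.1 ∈ L.map Prod.fst ∧
      pvFindA p ((L.filter (fun q => decide (q.1 ∉ used))).map Prod.snd)
        = some ((p, iw.2), (L.filter (fun q => decide (q.1 ∉ used ∧ q.1 ≠ iw.1))).map Prod.snd)) := by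
  induction L with
  | nil => left; simp [pvFindB, pvFindA]
  | cons q t ih =>
    obtain ⟨i, u, v⟩ := q
    simp only [List.map_cons, List.nodup_cons] at hnd
    obtain ⟨hi, hndt⟩ := hnd
    by_cases hu : i ∈ used
    · -- head's entries are all skipped by pvFindB, and the head is filtered out
      have hskip : pvFindB used (pvEntries p (i, u, v) ++ t.flatMap (pvEntries p))
          = pvFindB used (t.flatMap (pvEntries p)) := by
        unfold pvEntries
        split_ifs <;> simp [pvFindB, hu]
      have hfilt1 : List.filter (fun q => decide (q.1 ∉ used)) ((i, u, v) :: t)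
          = t.filter (fun q => decide (q.1 ∉ used)) := by
        simp [hu]
      rcases ih hndt with ⟨h1, h2⟩ | ⟨iw, h1, h2, h3, h4⟩
      · left
        constructor
        · rw [List.flatMap_cons, hskip]; exact h1
        · rw [hfilt1]; exact h2
      · right
        refine ⟨iw, ?_, h2, by simp [h3], ?_⟩
        · rw [List.flatMap_cons, hskip]; exact h1
        · rw [hfilt1, h4]
          have : List.filter (fun q => decide (q.1 ∉ used ∧ q.1 ≠ iw.1)) ((i, u, v) :: t)
              = t.filter (fun q => decide (q.1 ∉ used ∧ q.1 ≠ iw.1)) := by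
            simp [hu]
          rw [this]
    · -- head unused: it is in the filtered list
      have hfilt1 : List.filter (fun q => decide (q.1 ∉ used)) ((i, u, v) :: t)
          = (i, u, v) :: t.filter (fun q => decide (q.1 ∉ used)) := by
        simp [hu]
      by_cases h1 : u = p
      · -- pvFindB returns (i, v); pvFindA takes the u-branch
        right
        refine ⟨(i, v), ?_, hu, by simp, ?_⟩
        · rw [List.flatMap_cons]
          unfold pvEntries
          by_cases h2 : v = p <;> simp [pvFindB, hu, h1, h2]
        · have hcons : List.filter (fun q => decide (q.1 ∉ used ∧ q.1 ≠ i)) ((i, u, v) :: t)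
              = t.filter (fun q => decide (q.1 ∉ used ∧ q.1 ≠ i)) := by
            simp
          have hsame : t.filter (fun q => decide (q.1 ∉ used ∧ q.1 ≠ i))
              = t.filter (fun q => decide (q.1 ∉ used)) := by
            apply List.filter_congr
            intro q hq
            have : q.1 ≠ i := fun hqi => hi (hqi ▸ (List.mem_map_of_mem hq))
            simp [this]
          rw [hfilt1, hcons, hsame]
          simp only [List.map_cons]
          rw [pvFindA]
          simp [h1]
      · by_cases h2 : v = p
        · right
          refine ⟨(i, u), ?_, hu, by simp, ?_⟩
          · rw [List.flatMap_cons]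
            unfold pvEntries
            simp [pvFindB, hu, h1, h2]
          · have hcons : List.filter (fun q => decide (q.1 ∉ used ∧ q.1 ≠ i)) ((i, u, v) :: t)
                = t.filter (fun q => decide (q.1 ∉ used ∧ q.1 ≠ i)) := by
              simp
            have hsame : t.filter (fun q => decide (q.1 ∉ used ∧ q.1 ≠ i))
                = t.filter (fun q => decide (q.1 ∉ used)) := by
              apply List.filter_congr
              intro q hq
              have : q.1 ≠ i := fun hqi => hi (hqi ▸ (List.mem_map_of_mem hq))
              simp [this]
            rw [hfilt1, hcons, hsame]
            simp only [List.map_cons]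
            rw [pvFindA]
            simp [h1, h2]
        · -- head contributes no entries and does not match p
          have hskip : (pvEntries p (i, u, v)) = [] := by
            unfold pvEntries; simp [h1, h2]
          rcases ih hndt with ⟨g1, g2⟩ | ⟨iw, g1, g2, g3, g4⟩
          · left
            constructor
            · rw [List.flatMap_cons, hskip]; simpa using g1
            · rw [hfilt1]
              simp only [List.map_cons]
              rw [pvFindA]
              rw [if_neg h1, if_neg h2, g2]
          · right
            refine ⟨iw, ?_, g2, by simp [g3], ?_⟩
            · rw [List.flatMap_cons, hskip]; simpa using g1
            · have hine : i ≠ iw.1 := fun hie => hi (hie ▸ g3)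
              have hcons : List.filter (fun q => decide (q.1 ∉ used ∧ q.1 ≠ iw.1)) ((i, u, v) :: t)
                  = (i, u, v) :: t.filter (fun q => decide (q.1 ∉ used ∧ q.1 ≠ iw.1)) := by
                simp [hu, hine]
              rw [hfilt1, hcons]
              simp only [List.map_cons]
              rw [pvFindA]
              rw [if_neg h1, if_neg h2, g4]

theorem pv_loop_corr (cs : List (Int × Int)) (k : Nat) :
    ∀ (used : List Int) (loop : List (Int × Int)) (p : Int),
    loop.getLast?.map Prod.snd = some p →
    k = ((PySem.List.enumerate cs).filter (fun q => decide (q.1 ∉ used))).length →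
    pvWhileA loop (((PySem.List.enumerate cs).filter (fun q => decide (q.1 ∉ used))).map Prod.snd)
      = pvLoopB (pvAdjB cs) k p used loop := by
  induction k with
  | zero =>
    intro used loop p hp hk
    have : (PySem.List.enumerate cs).filter (fun q => decide (q.1 ∉ used)) = [] :=
      List.length_eq_zero_iff.mp hk.symm
    rw [this]
    simp [pvWhileA, pvLoopB]
  | succ k ih =>
    intro used loop p hp hk
    have hnd : ((PySem.List.enumerate cs).map Prod.fst).Nodup := by
      have hpw : ((PySem.List.enumerate cs).map Prod.fst).Pairwise (· < ·) :=
        List.pairwise_map.mpr (by simpa using PySem.List.pairwise_lt_enumerate cs 0)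
      exact hpw.imp ne_of_lt
    obtain ⟨le, hle⟩ : ∃ le, loop.getLast? = some le := by
      cases h : loop.getLast? with
      | none => rw [h] at hp; cases hp
      | some le => exact ⟨le, rfl⟩
    have hple : le.2 = p := by rw [hle] at hp; simpa using hp
    cases hF : (PySem.List.enumerate cs).filter (fun q => decide (q.1 ∉ used)) with
    | nil => rw [hF] at hk; cases hk
    | cons f0 ftl =>
      subst hple
      simp only [List.map_cons]
      rw [pvWhileA.eq_def]
      dsimp only
      rw [PySem.List.pyGet?_neg_one, hle]
      dsimp only
      rcases pv_step_corr le.2 (PySem.List.enumerate cs) used hnd with ⟨h1, h2⟩ | ⟨iw, h1, h2, h3, h4⟩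
      · rw [hF] at h2
        simp only [List.map_cons] at h2
        split
        · rw [pvLoopB, pv_adj_getD, h1]
        · rename_i ed rem heq
          rw [h2] at heq
          cases heq
      · rw [hF] at h4
        simp only [List.map_cons] at h4
        split
        · rename_i heq
          rw [h4] at heq
          cases heq
        · rename_i ed rem heq
          rw [h4] at heq
          injection heq with heq
          injection heq with heq1 heq2
          subst heq1
          subst heq2
          rw [pvLoopB, pv_adj_getD, h1]
          have hcong : (PySem.List.enumerate cs).filter (fun q => decide (q.1 ∉ PySem.Set.add used iw.1))
              = (PySem.List.enumerate cs).filter (fun q => decide (q.1 ∉ used ∧ q.1 ≠ iw.1)) := by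
            apply List.filter_congr
            intro q _
            simp [PySem.Set.mem_add, not_or]
          have hk' : k = ((PySem.List.enumerate cs).filter
              (fun q => decide (q.1 ∉ PySem.Set.add used iw.1))).length := by
            have hlen := pvFindA_length le.2 (f0.2 :: List.map Prod.snd ftl) _ _ h4
            rw [hcong]
            have h5 : ((PySem.List.enumerate cs).filter
                (fun q => decide (q.1 ∉ used ∧ q.1 ≠ iw.1))).length + 1 = k + 1 := by
              have := hk
              rw [hF] at this
              simpa [this] using hlen
            omega
          have hrec := ih (PySem.Set.add used iw.1) (loop ++ [(le.2, iw.2)]) iw.2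
            (by rw [List.getLast?_concat]; rfl) hk'
          rw [hcong] at hrec
          exact hrec

theorem pv_tail_filter (c0 : Int × Int) (rest : List (Int × Int)) :
    (PySem.List.enumerate (c0 :: rest)).filter (fun q => decide (q.1 ∉ ([0] : List Int)))
      = PySem.List.enumerate rest 1 := by
  rw [PySem.List.enumerate_cons]
  rw [List.filter_cons]
  simp only [decide_not]
  norm_num
  intro a a1 b h
  rcases (PySem.List.mem_enumerate_iff rest 1 _).mp h with ⟨j, hj, heq⟩
  simp [Prod.ext_iff] at heq
  omega

-- ===== VERDICT (by name: the statement is the Claim_ definition above) =====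
theorem get_poly_outline_spec : Claim_equal_get_poly_outline := by
  intro vertices faces _ _
  unfold Spec_get_poly_outline get_poly_outline get_poly_outline_alt
  dsimp only
  rw [pv_cands_eq faces]
  cases hc : ((pvEdgeDictB faces).items.filter (fun p => p.2 == 1)).map Prod.fst with
  | nil => rfl
  | cons c0 rest =>
    show pvWhileA [c0] rest
        = pvLoopB (pvAdjB (c0 :: rest)) rest.length c0.2 (PySem.Set.ofList [0]) [c0]
    have hset : PySem.Set.ofList [(0:Int)] = [0] := rfl
    rw [hset]
    have := pv_loop_corr (c0 :: rest) rest.length [0] [c0] c0.2 rfl ?hk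
    · rw [pv_tail_filter] at this
      rw [PySem.List.map_snd_enumerate] at this
      exact this
    case hk =>
      rw [pv_tail_filter]
      rw [PySem.List.length_enumerate]
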